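-- pv_equiv track=rewrite | github.com/minpeter/krill | src/krill/utils/streaming_dataset.py | filter_batch_by_length_streaming
-- ===== SOURCE A (Python) =====
-- def filter_batch_by_length_streaming(batch: list, min_length: int) -> tuple[list, int]:
--     """Filter batch by minimum token length."""
--     filtered_batch = []
--     dropped_tokens = 0
--
--     for sample in batch:
--         length = len(sample["input_ids"])
--         if length >= min_length:
--             filtered_batch.append(sample)
--         else:
--             dropped_tokens += length
--
--     return filtered_batch, dropped_tokens
-- ===== SOURCE B (Python) =====
-- def filter_batch_by_length_streaming(batch: list, min_length: int) -> tuple[list, int]: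
--     """Filter by min token length; dropped count via complement subtraction:
--     total tokens minus tokens kept (never scans the dropped samples' condition '<')."""
--     total_tokens = sum(len(s["input_ids"]) for s in batch)
--     filtered_batch = [s for s in batch if len(s["input_ids"]) >= min_length]
--     kept_tokens = sum(len(s["input_ids"]) for s in filtered_batch)
--     return filtered_batch, total_tokens - kept_tokens
-- ===== Notes on version B (the rewrite author's own statement) =====
-- stated objective: alternative
-- what changed: A interleaves filtering and a running dropped-token accumulator in one loop; B never sums the failing samples at all: it computes the grand total of token lengths, filters the kept samples, and obtains dropped_tokens as total minus kept (complement subtraction, relying on the partition invariant total = kept + dropped).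
import Mathlib
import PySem

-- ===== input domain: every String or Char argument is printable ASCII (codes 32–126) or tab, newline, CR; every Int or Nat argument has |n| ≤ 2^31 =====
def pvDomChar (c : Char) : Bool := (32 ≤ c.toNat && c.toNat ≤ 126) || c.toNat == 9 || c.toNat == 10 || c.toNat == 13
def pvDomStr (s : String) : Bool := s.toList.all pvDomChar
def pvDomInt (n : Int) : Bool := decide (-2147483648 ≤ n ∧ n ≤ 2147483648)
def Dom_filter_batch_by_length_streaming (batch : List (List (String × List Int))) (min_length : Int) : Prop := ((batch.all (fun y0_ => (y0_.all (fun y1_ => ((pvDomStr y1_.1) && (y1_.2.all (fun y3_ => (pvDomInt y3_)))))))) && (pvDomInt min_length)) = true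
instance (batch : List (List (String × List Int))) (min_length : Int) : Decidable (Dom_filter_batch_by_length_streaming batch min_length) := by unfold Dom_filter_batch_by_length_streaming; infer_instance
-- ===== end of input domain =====

-- B is an alternative decomposition: it never sums the failing samples — dropped_tokens is obtained as (total token count) - (kept token count); same O(n) cost.


-- len(sample["input_ids"]) : first-match lookup of the dict key, length as Int
-- (exact for Python dicts, whose keys are unique; Pre_ guarantees the key is present)
def pvIdsLen (sample : List (String × List Int)) : Int :=
  ((sample.lookup "input_ids").getD []).length

-- ===== PORT A =====
def filter_batch_by_length_streaming (batch : List (List (String × List Int))) (min_length : Int) : (List (List (String × List Int))) × Int :=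
  batch.foldl
    (fun st sample =>
      let length := pvIdsLen sample
      if length ≥ min_length then (st.1 ++ [sample], st.2) else (st.1, st.2 + length))
    ([], 0)

-- ===== PORT B =====
def filter_batch_by_length_streaming_alt (batch : List (List (String × List Int))) (min_length : Int) : (List (List (String × List Int))) × Int :=
  let total_tokens := (batch.map pvIdsLen).sum
  let filtered_batch := batch.filter (fun s => pvIdsLen s ≥ min_length)
  let kept_tokens := (filtered_batch.map pvIdsLen).sum
  (filtered_batch, total_tokens - kept_tokens)

-- ===== PRECONDITION & SPEC =====
-- Pre_: every sample contains the key "input_ids"; on a sample without it Python A raises KeyError.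
def Pre_filter_batch_by_length_streaming (batch : List (List (String × List Int))) (min_length : Int) : Prop :=
  ∀ s ∈ batch, (s.lookup "input_ids").isSome = true
instance (batch : List (List (String × List Int))) (min_length : Int) : Decidable (Pre_filter_batch_by_length_streaming batch min_length) := by unfold Pre_filter_batch_by_length_streaming; infer_instance
def pvWitness_filter_batch_by_length_streaming : (List (List (String × List Int))) × Int :=
  ([[("input_ids", [1, 2, 3])], [("input_ids", [4])]], 2)
def Spec_filter_batch_by_length_streaming (batch : List (List (String × List Int))) (min_length : Int) (out : (List (List (String × List Int))) × Int) : Prop := out = filter_batch_by_length_streaming_alt batch min_length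
instance (batch : List (List (String × List Int))) (min_length : Int) (out : (List (List (String × List Int))) × Int) : Decidable (Spec_filter_batch_by_length_streaming batch min_length out) := by unfold Spec_filter_batch_by_length_streaming; infer_instance

-- ===== CLAIM (what is proved, stated in full; the proofs are below) =====
def Claim_equal_filter_batch_by_length_streaming : Prop := ∀ (batch : List (List (String × List Int))) (min_length : Int), Dom_filter_batch_by_length_streaming batch min_length → Pre_filter_batch_by_length_streaming batch min_length → Spec_filter_batch_by_length_streaming batch min_length (filter_batch_by_length_streaming batch min_length)

-- ===== LEMMAS AND PROOFS =====
-- A's fold, characterised: kept list is the ≥-filter, accumulator is total minus kept tokens.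
theorem foldl_filter_sub (min_length : Int) (batch : List (List (String × List Int)))
    (acc : List (List (String × List Int))) (d : Int) :
    batch.foldl
      (fun st sample =>
        let length := pvIdsLen sample
        if length ≥ min_length then (st.1 ++ [sample], st.2) else (st.1, st.2 + length))
      (acc, d)
    = (acc ++ batch.filter (fun s => pvIdsLen s ≥ min_length),
       d + ((batch.map pvIdsLen).sum
            - ((batch.filter (fun s => pvIdsLen s ≥ min_length)).map pvIdsLen).sum)) := by
  induction batch generalizing acc d with
  | nil => simp
  | cons x xs ih =>
    simp only [List.foldl_cons, List.filter_cons, List.map_cons, List.sum_cons]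
    by_cases h : pvIdsLen x ≥ min_length
    · rw [if_pos h, ih]
      simp [h]
    · rw [if_neg h, ih]
      simp [h]
      ring

-- ===== VERDICT (by name: the statement is the Claim_ definition above) =====
theorem filter_batch_by_length_streaming_spec : Claim_equal_filter_batch_by_length_streaming := by
  intro batch min_length _ _
  unfold Spec_filter_batch_by_length_streaming
  unfold filter_batch_by_length_streaming filter_batch_by_length_streaming_alt
  rw [foldl_filter_sub]
  simp
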